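-- pv_equiv track=rewrite | github.com/981377660LMT/algorithm-study | 22_专题/离线查询/根号分治/1714. 数组中特殊等间距元素的和-分块算法.py | solve
-- ===== SOURCE A (Python) =====
-- from functools import lru_cache
-- from math import sqrt
-- from typing import List
--
-- MOD = int(1e9 + 7)
--
-- def solve(nums: List[int], queries: List[List[int]]) -> List[int]:
--     """每个查询要计算nums[start:n:step]的和
--
--     记忆化的形式代替分块思想
--     注意到不能全部dfs,这样的复杂度是O(n*step)的
--     将step限制在根号n以内,那么只需要在时间复杂度O(n*根号n)内预处理答案,然后O(1)查询
--     如果step大于根号n,那么只需要在时间复杂度O(根号n)内暴力查询即可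
--
--     dfs超时了
--     """
--
--     @lru_cache(None)
--     def dfs(start: int, step: int) -> int:
--         if start >= n:
--             return 0
--         return (nums[start] + dfs(start + step, step) % MOD) % MOD
--
--     n = len(nums)
--     res = [0] * len(queries)
--     sqrt_ = int(sqrt(n))
--     for i, (start, step) in enumerate(queries):
--         if step <= sqrt_:
--             res[i] = dfs(start, step)
--         else:
--             res[i] = sum(nums[start:n:step]) % MOD
--     dfs.cache_clear()
--     return res
-- ===== SOURCE B (Python) =====
-- from typing import List
--
-- MOD = int(1e9 + 7)
--
-- def solve(nums: List[int], queries: List[List[int]]) -> List[int]: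
--     """Sum of nums[start:n:step] for each query: one uniform slice-sum per
--     query, no sqrt threshold, no memoized recursion."""
--     n = len(nums)
--     return [sum(nums[start:n:step]) % MOD for start, step in queries]
-- ===== Notes on version B (the rewrite author's own statement) =====
-- stated objective: simpler
-- what changed: B replaces the sqrt-threshold decomposition (memoized dfs for small steps, brute slice-sum for large steps) by one uniform slice-sum per query, relying on modular addition being the same whether reduced incrementally or once at the end.
-- outside the precondition, e.g. on solve([1], [[5, 0]]): A returns [0], B raises ValueError; on solve([1, 2, 3], [[-1, 1]]): A returns [9], B returns [3]
import Mathlib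
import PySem

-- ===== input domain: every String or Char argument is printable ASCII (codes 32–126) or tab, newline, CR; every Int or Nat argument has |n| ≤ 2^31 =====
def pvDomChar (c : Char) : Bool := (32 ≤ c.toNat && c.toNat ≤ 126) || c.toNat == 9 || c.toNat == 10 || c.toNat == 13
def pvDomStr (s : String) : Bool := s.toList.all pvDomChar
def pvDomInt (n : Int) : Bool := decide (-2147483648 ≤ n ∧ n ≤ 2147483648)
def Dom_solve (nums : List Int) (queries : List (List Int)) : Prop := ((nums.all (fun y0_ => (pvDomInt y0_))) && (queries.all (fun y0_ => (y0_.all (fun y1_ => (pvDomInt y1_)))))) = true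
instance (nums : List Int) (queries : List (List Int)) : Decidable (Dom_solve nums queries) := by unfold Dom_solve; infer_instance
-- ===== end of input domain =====

-- B replaces A's sqrt-threshold decomposition (memoized dfs for small steps, slice-sum for
-- large steps) by one uniform slice-sum per query; return values only.

def pvMOD : Int := 1000000007

-- int(sqrt(n)) = floor of the square root: equal to Python's int(sqrt(n)) for every
-- representable list length; written as a filter count so the kernel can evaluate it.
def pvISqrt (n : Nat) : Nat := ((List.range (n + 1)).filter (fun k => k * k ≤ n)).length - 1

-- ===== PORT A =====
-- dfs(start, step): the lru_cache is a pure cache, so the port is the plain recursion;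
-- fuel 2*len+1 bounds the recursion depth on every input admitted by Pre_solve.
def dfsA (nums : List Int) (n step : Int) : Nat → Int → Int
  | 0, _ => 0
  | fuel+1, start =>
    if n ≤ start then 0
    else PySem.Int.mod (PySem.List.pyGetD nums start 0 +
           PySem.Int.mod (dfsA nums n step fuel (start + step)) pvMOD) pvMOD

def solve (nums : List Int) (queries : List (List Int)) : List Int :=
  let n : Int := nums.length
  let sqrt_ : Int := pvISqrt nums.length
  queries.map (fun q =>
    let start := PySem.List.pyGetD q 0 0
    let step := PySem.List.pyGetD q 1 0
    if step ≤ sqrt_ then dfsA nums n step (2 * nums.length + 1) start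
    else PySem.Int.mod ((PySem.List.slice? nums (some start) (some n) step).getD []).sum pvMOD)

-- ===== PORT B =====
def solve_alt (nums : List Int) (queries : List (List Int)) : List Int :=
  let n : Int := nums.length
  queries.map (fun q =>
    PySem.Int.mod ((PySem.List.slice? nums (some (PySem.List.pyGetD q 0 0)) (some n)
      (PySem.List.pyGetD q 1 0)).getD []).sum pvMOD)

-- ===== PRECONDITION & SPEC =====
-- Pre_ excludes the inputs on which A or B raises — queries of arity ≠ 2 (ValueError on
-- unpacking, both programs), step ≤ 0 with start < n (RecursionError/IndexError in A's dfs),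
-- step = 0 with start ≥ n (A returns 0 but B raises ValueError on the zero-step slice),
-- start < -n with 1 ≤ step ≤ int(sqrt(n)) (IndexError in A's dfs) — and restricts starts of
-- small-step queries to the problem's natural domain 0 ≤ start (LeetCode 1714 guarantees
-- 0 ≤ start < n): on a negative start A's dfs wraps the index element-wise while A's own
-- large-step branch (and B) use slice semantics, an unspecified corner no caller relies on.
def Pre_solve (nums : List Int) (queries : List (List Int)) : Prop :=
  ∀ q ∈ queries, q.length = 2 ∧
    (1 ≤ PySem.List.pyGetD q 1 0 ∨
      (PySem.List.pyGetD q 1 0 ≤ -1 ∧ (nums.length : Int) ≤ PySem.List.pyGetD q 0 0)) ∧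
    (1 ≤ PySem.List.pyGetD q 1 0 ∧ PySem.List.pyGetD q 1 0 ≤ (pvISqrt nums.length : Int) →
      0 ≤ PySem.List.pyGetD q 0 0)
instance (nums : List Int) (queries : List (List Int)) : Decidable (Pre_solve nums queries) := by
  unfold Pre_solve; infer_instance

def pvWitness_solve : List Int × List (List Int) := ([1, 2, 3], [[0, 1], [1, 2], [2, 7]])

def Spec_solve (nums : List Int) (queries : List (List Int)) (out : List Int) : Prop :=
  out = solve_alt nums queries
instance (nums : List Int) (queries : List (List Int)) (out : List Int) : Decidable (Spec_solve nums queries out) := by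
  unfold Spec_solve; infer_instance

-- ===== CLAIM (what is proved, stated in full; the proofs are below) =====
def Claim_equal_solve : Prop := ∀ (nums : List Int) (queries : List (List Int)), Dom_solve nums queries → Pre_solve nums queries → Spec_solve nums queries (solve nums queries)

-- ===== LEMMAS AND PROOFS =====

lemma sliceIndices_pos (n : Nat) (a st : Int) (hst : 0 < st) (h0 : 0 ≤ a) :
    PySem.List.sliceIndices n (some a) (some (n : Int)) st = (min a (n : Int), (n : Int), st) := by
  simp only [PySem.List.sliceIndices, if_neg (by omega : ¬ st < 0), if_neg (by omega : ¬ a < 0),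
    if_neg (by omega : ¬ (n : Int) < 0)]
  simp [min_self]

lemma slice?_pos_eq (xs : List Int) (a st : Int) (hst : 0 < st) (h0 : 0 ≤ a) :
    PySem.List.slice? xs (some a) (some (xs.length : Int)) st =
      some (List.filterMap (fun (k : Nat) => xs[(min a (xs.length : Int) + st * (k : Int)).toNat]?)
        (List.range (if min a (xs.length : Int) < (xs.length : Int) then
          (((xs.length : Int) - min a (xs.length : Int) + st - 1) / st).toNat else 0))) := by
  have h := sliceIndices_pos xs.length a st hst h0
  simp only [PySem.List.slice?, if_neg (by omega : ¬ st = 0), h, if_pos hst]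

lemma slice?_len_ge (xs : List Int) (a st : Int) (hst : 0 < st) (ha : (xs.length : Int) ≤ a) :
    PySem.List.slice? xs (some a) (some (xs.length : Int)) st = some [] := by
  have h0 : 0 ≤ a := le_trans (by positivity) ha
  rw [slice?_pos_eq xs a st hst h0, if_neg (by omega), List.range_zero, List.filterMap_nil]

lemma sliceIndices_neg (n : Nat) (a st : Int) (hst : st < 0) (h0 : 0 ≤ a) :
    PySem.List.sliceIndices n (some a) (some (n : Int)) st
      = (min a ((n : Int) - 1), (n : Int) - 1, st) := by
  simp only [PySem.List.sliceIndices, if_pos hst, if_neg (by omega : ¬ a < 0),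
    if_neg (by omega : ¬ (n : Int) < 0)]
  simp [min_eq_right (by omega : (n : Int) - 1 ≤ (n : Int))]

lemma slice?_neg_empty (xs : List Int) (a st : Int) (hst : st < 0) (ha : (xs.length : Int) ≤ a) :
    PySem.List.slice? xs (some a) (some (xs.length : Int)) st = some [] := by
  have h0 : 0 ≤ a := le_trans (by positivity) ha
  rw [PySem.List.slice?]
  rw [if_neg (by omega : ¬ st = 0), sliceIndices_neg xs.length a st hst h0,
    min_eq_right (by omega : (xs.length : Int) - 1 ≤ a)]
  simp [if_neg (by omega : ¬ (0:Int) < st), if_neg (lt_irrefl ((xs.length : Int) - 1))]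

lemma slice?_len_cons (xs : List Int) (a st : Int) (hst : 0 < st) (h0 : 0 ≤ a)
    (ha : a < (xs.length : Int)) :
    PySem.List.slice? xs (some a) (some (xs.length : Int)) st =
      some (xs.getD a.toNat 0 ::
        (PySem.List.slice? xs (some (a + st)) (some (xs.length : Int)) st).getD []) := by
  have hmin : min a (xs.length : Int) = a := by omega
  have hq0 : 0 ≤ ((xs.length : Int) - a - 1) / st := Int.ediv_nonneg (by omega) (by omega)
  have hcnt : (((xs.length : Int) - a + st - 1) / st).toNat
      = (((xs.length : Int) - a - 1) / st).toNat + 1 := by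
    have h1 : (xs.length : Int) - a + st - 1 = ((xs.length : Int) - a - 1) + 1 * st := by ring
    rw [h1, Int.add_mul_ediv_right _ _ (by omega : st ≠ 0)]
    omega
  rw [slice?_pos_eq xs a st hst h0, hmin, if_pos ha, hcnt, List.range_succ_eq_map]
  have hget : xs[(a + st * ((0:Nat) : Int)).toNat]? = some (xs.getD a.toNat 0) := by
    simp [List.getD, List.getElem?_eq_getElem (by omega : a.toNat < xs.length)]
  rw [List.filterMap_cons]
  simp only [hget]
  congr 2
  rw [List.filterMap_map]
  by_cases hlt : a + st < (xs.length : Int)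
  · rw [slice?_pos_eq xs (a + st) st hst (by omega), if_pos (by omega), Option.getD_some,
      min_eq_left (by omega)]
    have hc : (((xs.length : Int) - (a + st) + st - 1) / st).toNat
        = (((xs.length : Int) - a - 1) / st).toNat := by
      congr 1; ring_nf
    rw [hc]
    apply List.filterMap_congr
    intro k _
    simp only [Function.comp]
    congr 2
    push_cast
    ring
  · rw [slice?_len_ge xs (a + st) st hst (by omega), Option.getD_some]
    have hc : ((xs.length : Int) - a - 1) / st = 0 :=
      Int.ediv_eq_zero_of_lt (by omega) (by omega)
    rw [hc]
    simp

lemma dfs_eq_slice (nums : List Int) (st : Int) (hst : 0 < st) :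
    ∀ (fuel : Nat) (a : Int), 0 ≤ a → ((nums.length : Int) - a).toNat < fuel →
      dfsA nums (nums.length : Int) st fuel a =
        PySem.Int.mod ((PySem.List.slice? nums (some a) (some (nums.length : Int)) st).getD []).sum pvMOD := by
  have hM : (0 : Int) < pvMOD := by norm_num [pvMOD]
  intro fuel
  induction fuel with
  | zero => intro a _ h; omega
  | succ f ih =>
    intro a h0 hf
    by_cases hge : (nums.length : Int) ≤ a
    · rw [slice?_len_ge nums a st hst hge]
      simp [dfsA, hge, PySem.Int.mod_eq_emod_of_pos hM]
    · push_neg at hge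
      have htail := ih (a + st) (by omega) (by omega)
      rw [slice?_len_cons nums a st hst h0 hge]
      simp only [dfsA, if_neg (by omega : ¬ (nums.length : Int) ≤ a), htail,
        Option.getD_some, List.sum_cons]
      rw [PySem.List.pyGetD_eq_getElem nums (0:Int) h0 hge]
      rw [List.getD_eq_getElem _ _ (by omega : a.toNat < nums.length)]
      simp only [PySem.Int.mod_eq_emod_of_pos hM]
      simp [Int.add_emod_emod, Int.emod_add_emod]

-- ===== VERDICT (by name: the statement is the Claim_ definition above) =====
theorem solve_spec : Claim_equal_solve := by
  intro nums queries _ hpre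
  unfold Spec_solve solve solve_alt
  apply List.map_congr_left
  intro q hq
  obtain ⟨hlen, hstep, hneg⟩ := hpre q hq
  by_cases hbr : PySem.List.pyGetD q 1 0 ≤ ((pvISqrt nums.length : Nat) : Int)
  · rw [if_pos hbr]
    rcases hstep with h1 | ⟨h1, h2⟩
    · have hstart : 0 ≤ PySem.List.pyGetD q 0 0 := hneg ⟨h1, hbr⟩
      exact dfs_eq_slice nums (PySem.List.pyGetD q 1 0) (by omega)
        (2 * nums.length + 1) (PySem.List.pyGetD q 0 0) hstart (by omega)
    · rw [slice?_neg_empty nums _ _ (by omega) h2]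
      have hM : (0 : Int) < pvMOD := by norm_num [pvMOD]
      simp [dfsA, h2, PySem.Int.mod_eq_emod_of_pos hM]
  · rw [if_neg hbr]
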